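-- pv_equiv track=rewrite | github.com/calfzhou/gocalf.com | source/coding/assets/2275-largest-combination-with-bitwise-and-greater-than-zero/solution.py | largestCombination
-- ===== SOURCE A (Python) =====
-- def largestCombination(candidates: list[int]) -> int:
--     counts = [0] * 24 # log2(1e7, 2)
--     for num in candidates:
--         i = 0
--         while num > 0:
--             counts[i] += num & 1
--             num >>= 1
--             i += 1
--
--     return max(counts)
-- ===== SOURCE B (Python) =====
-- def largestCombination(candidates: list[int]) -> int:
--     # Divide and conquer: recursively compute the 24-entry per-bit count table of each
--     # half of the list and merge them by elementwise addition; answer is the max entry.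
--     def table(nums):
--         if not nums:
--             return [0] * 24
--         if len(nums) == 1:
--             n = nums[0]
--             return [(n >> i) & 1 if n > 0 else 0 for i in range(24)]
--         mid = len(nums) // 2
--         return [x + y for x, y in zip(table(nums[:mid]), table(nums[mid:]))]
--     return max(table(candidates))
-- ===== Notes on version B (the rewrite author's own statement) =====
-- stated objective: alternative
-- what changed: Replaces A's single left-to-right pass that destructively updates a shared 24-entry counter table via an inner bit-stripping while loop with a divide-and-conquer recursion: the list is split in halves, each half's per-bit count table is computed recursively (base case builds one number's bit vector by shift-and-mask) and tables are merged by elementwise addition before taking the max.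
-- outside the precondition, e.g. on largestCombination([16777216]): A raises IndexError, B returns 0
import Mathlib
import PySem

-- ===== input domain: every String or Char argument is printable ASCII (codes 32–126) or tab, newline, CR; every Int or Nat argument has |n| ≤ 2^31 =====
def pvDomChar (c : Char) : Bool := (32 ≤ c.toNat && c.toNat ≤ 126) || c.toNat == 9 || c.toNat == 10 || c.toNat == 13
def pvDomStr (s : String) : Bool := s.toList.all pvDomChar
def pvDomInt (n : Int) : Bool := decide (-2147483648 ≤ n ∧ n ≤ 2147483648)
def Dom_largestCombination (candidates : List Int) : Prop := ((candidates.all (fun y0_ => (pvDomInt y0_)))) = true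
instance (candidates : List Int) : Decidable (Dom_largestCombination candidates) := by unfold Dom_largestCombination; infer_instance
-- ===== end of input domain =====

-- B replaces A's one-pass destructive counter table with a divide-and-conquer recursion
-- that builds each half's per-bit count table and merges them by elementwise addition.

-- ===== PORT A =====
-- the inner `while num > 0:` loop; it runs only for positive num, so on num.toNat;
-- `counts[i] += num & 1` is in range for every admitted input (Pre_ bounds num < 2^24),
-- so the in-range store List.set transcribes it.
def largestCombinationGo (num : Nat) (i : Nat) (counts : List Int) : List Int :=
  if num = 0 then counts
  else largestCombinationGo (num / 2) (i + 1)
        (counts.set i (counts.getD i 0 + (num % 2 : Nat)))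

def largestCombination (candidates : List Int) : Int :=
  let counts : List Int := List.replicate 24 0
  let counts := candidates.foldl
    (fun counts num => if num > 0 then largestCombinationGo num.toNat 0 counts else counts)
    counts
  (PySem.List.max? counts (fun x => x)).getD 0  -- max(counts); counts has 24 entries, never empty

-- ===== PORT B =====
-- `table(nums)`: the recursive per-bit count table of Source B
def lcTable (nums : List Int) : List Int :=
  if h0 : nums = [] then List.replicate 24 0
  else if h1 : nums.length = 1 then
    (List.range 24).map (fun (i : Nat) =>
      if nums.getD 0 0 > 0 then PySem.Int.band (nums.getD 0 0 >>> i) 1 else 0)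
  else
    List.zipWith (· + ·) (lcTable (nums.take (nums.length / 2)))
                         (lcTable (nums.drop (nums.length / 2)))
termination_by nums.length
decreasing_by
  all_goals
    have hne : nums.length ≠ 0 := fun h => h0 (List.eq_nil_of_length_eq_zero h)
    simp only [List.length_take, List.length_drop]
    omega

def largestCombination_alt (candidates : List Int) : Int :=
  (PySem.List.max? (lcTable candidates) (fun x => x)).getD 0  -- max over the table, never empty

-- ===== PRECONDITION & SPEC =====
-- Pre_ excludes exactly the inputs on which A raises IndexError: an element ≥ 2^24 drives
-- the while loop past the end of the 24-entry counter table.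
def Pre_largestCombination (candidates : List Int) : Prop :=
  ∀ n ∈ candidates, n < 16777216
instance (candidates : List Int) : Decidable (Pre_largestCombination candidates) := by
  unfold Pre_largestCombination; infer_instance

def pvWitness_largestCombination : List Int := [7, 16, -3, 0, 16777215]

def Spec_largestCombination (candidates : List Int) (out : Int) : Prop :=
  out = largestCombination_alt candidates
instance (candidates : List Int) (out : Int) : Decidable (Spec_largestCombination candidates out) := by
  unfold Spec_largestCombination; infer_instance

-- ===== CLAIM (what is proved, stated in full; the proofs are below) =====
def Claim_equal_largestCombination : Prop :=
  ∀ (candidates : List Int), Dom_largestCombination candidates →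
    Pre_largestCombination candidates →
    Spec_largestCombination candidates (largestCombination candidates)

-- ===== LEMMAS AND PROOFS =====

theorem goA_length (num i : Nat) (counts : List Int) :
    (largestCombinationGo num i counts).length = counts.length := by
  induction num using Nat.strong_induction_on generalizing i counts with
  | _ num ih =>
    rw [largestCombinationGo]
    by_cases h : num = 0
    · simp [h]
    · rw [if_neg h, ih _ (Nat.div_lt_self (Nat.pos_of_ne_zero h) one_lt_two)]
      simp

-- per-position effect of the inner while loop
theorem goA_getD (num i : Nat) (counts : List Int) (j : Nat) (hj : j < counts.length) :
    (largestCombinationGo num i counts).getD j 0 =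
      counts.getD j 0 + (if i ≤ j then ((num >>> (j - i)) % 2 : Nat) else 0) := by
  induction num using Nat.strong_induction_on generalizing i counts with
  | _ num ih =>
    rw [largestCombinationGo]
    by_cases h : num = 0
    · simp [h]
    · rw [if_neg h, ih _ (Nat.div_lt_self (Nat.pos_of_ne_zero h) one_lt_two) _ _
          (by simpa using hj)]
      by_cases hij : i ≤ j
      · by_cases hji : j = i
        · subst hji
          have h1 : ¬ (j + 1 ≤ j) := by omega
          rw [if_neg h1, show ((counts.set j (counts.getD j 0 + (num % 2 : Nat))).getD j 0)
                = counts.getD j 0 + (num % 2 : Nat) from by simp [List.getD, hj]]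
          simp only [Nat.sub_self, Nat.shiftRight_zero]
          push_cast
          omega
        · have hset : (counts.set i (counts.getD i 0 + (num % 2 : Nat))).getD j 0
              = counts.getD j 0 := by
            rw [List.getD, List.getD, List.getElem?_set_ne (by omega)]
            rfl
          have h1 : i + 1 ≤ j := by omega
          have h2 : j - i = (j - (i+1)) + 1 := by omega
          rw [hset]
          simp only [hij, h1, if_pos]
          rw [h2, Nat.shiftRight_succ_inside]
      · have h1 : ¬ (i + 1 ≤ j) := by omega
        have hset : (counts.set i (counts.getD i 0 + (num % 2 : Nat))).getD j 0
            = counts.getD j 0 := by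
          rw [List.getD, List.getD, List.getElem?_set_ne (by omega)]
          rfl
        rw [if_neg h1, if_neg hij, hset]

def pvBit (n : Int) (j : Nat) : Int := if n > 0 then ((n.toNat >>> j) % 2 : Nat) else 0

-- A's folded counter table, per position
theorem foldA_getD (l : List Int) (counts : List Int) (j : Nat) (hj : j < counts.length) :
    (l.foldl (fun counts num =>
        if num > 0 then largestCombinationGo num.toNat 0 counts else counts) counts).getD j 0
      = counts.getD j 0 + (l.map (fun n => pvBit n j)).sum := by
  induction l generalizing counts with
  | nil => simp
  | cons n t ih =>
      simp only [List.foldl_cons, List.map_cons, List.sum_cons]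
      by_cases hn : n > 0
      · rw [if_pos hn, ih _ (by rw [goA_length]; exact hj), goA_getD _ _ _ _ hj]
        simp only [Nat.zero_le, if_pos, Nat.sub_zero, pvBit, hn]
        ring
      · rw [if_neg hn, ih _ hj]
        simp [pvBit, hn]

-- A's table equals the per-position bit-count map
theorem tableA_eq (l : List Int) :
    (l.foldl (fun counts num =>
        if num > 0 then largestCombinationGo num.toNat 0 counts else counts)
      (List.replicate 24 (0 : Int)))
    = (List.range 24).map (fun (j : Nat) => (l.map (fun n => pvBit n j)).sum) := by
  apply List.ext_getElem
  · rw [show ∀ c, (l.foldl (fun counts num =>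
        if num > 0 then largestCombinationGo num.toNat 0 counts else counts) c).length
        = c.length from ?_, List.length_replicate, List.length_map, List.length_range]
    intro c
    induction l generalizing c with
    | nil => rfl
    | cons n t ih =>
        simp only [List.foldl_cons]
        by_cases hn : n > 0
        · rw [if_pos hn, ih, goA_length]
        · rw [if_neg hn, ih]
  · intro j h1 h2
    have hj : j < 24 := by simpa using h2
    rw [List.getElem_map, List.getElem_range, List.getElem_eq_getD,
        foldA_getD l _ j (by simpa using hj)]
    have hrep : (List.replicate 24 (0:Int)).getD j 0 = 0 := by
      interval_cases j <;> rfl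
    rw [hrep, zero_add]

-- B's base-case bit test agrees with pvBit
theorem bandBit_eq (n : Int) (j : Nat) (hn : n > 0) :
    PySem.Int.band (n >>> j) 1 = pvBit n j := by
  have hn' : n = (n.toNat : Int) := by omega
  rw [pvBit, if_pos hn, hn']
  rw [show ((n.toNat : Int) >>> j) = ((n.toNat >>> j : Nat) : Int) from by
        simp [Int.natCast_shiftRight]]
  rw [show (1 : Int) = ((1 : Nat) : Int) from rfl, PySem.Int.band_natCast,
      Nat.and_one_is_mod]
  simp

theorem zipWith_add_map (l : List Nat) (f g : Nat → Int) :
    List.zipWith (· + ·) (l.map f) (l.map g) = l.map (fun j => f j + g j) := by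
  induction l with
  | nil => rfl
  | cons a t ih => simp [ih]

-- B's divide-and-conquer table equals the same per-position bit-count map
theorem tableB_aux : ∀ (k : Nat) (l : List Int), l.length = k →
    lcTable l = (List.range 24).map (fun (j : Nat) => (l.map (fun n => pvBit n j)).sum) := by
  intro k
  induction k using Nat.strong_induction_on with
  | _ k ih =>
    intro l hl
    rw [lcTable]
    by_cases h0 : l = []
    · subst h0
      simp
    · rw [dif_neg h0]
      by_cases h1 : l.length = 1
      · rw [dif_pos h1]
        match l, h1 with
        | [n], _ =>
          apply List.map_congr_left
          intro j _
          by_cases hn : n > 0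
          · simp only [List.getD, List.getElem?_cons_zero, Option.getD_some, if_pos hn,
              List.map_cons, List.map_nil, List.sum_cons, List.sum_nil, add_zero]
            exact bandBit_eq n j hn
          · simp [hn, pvBit]
      · rw [dif_neg h1]
        have hlen : 2 ≤ l.length := by
          rcases l with _ | ⟨a, _ | ⟨b, t⟩⟩ <;> simp_all <;> omega
        rw [ih (l.take (l.length / 2)).length (by subst hl; simp; omega) _ rfl,
            ih (l.drop (l.length / 2)).length (by subst hl; simp; omega) _ rfl,
            zipWith_add_map]
        apply List.map_congr_left
        intro j _
        conv_rhs => rw [← List.take_append_drop (l.length / 2) l]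
        rw [List.map_append, List.sum_append]

theorem tableB_eq (l : List Int) :
    lcTable l = (List.range 24).map (fun (j : Nat) => (l.map (fun n => pvBit n j)).sum) :=
  tableB_aux l.length l rfl

-- ===== VERDICT (by name: the statement is the Claim_ definition above) =====
theorem largestCombination_spec : Claim_equal_largestCombination := by
  intro candidates _ _
  show largestCombination candidates = largestCombination_alt candidates
  simp only [largestCombination, largestCombination_alt, tableA_eq, tableB_eq]
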